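-- pv_equiv track=rewrite | github.com/pahung1999/invoice_extraction | spade/model_postprocessors.py | get_parsed_grouping_v2
-- ===== SOURCE A (Python) =====
-- def get_parsed_grouping_v2(fields, rel_g, labeling):
--     itc = rel_g[0:len(fields)]
--     stc = rel_g[len(fields):]
--     grouping = [-1]*len(stc)
--     head_group = []
--     for i in range(len(stc)):
--         for j in range(len(stc)):
--             if stc[i][j] == 1 and i not in head_group:
--                 head_group.append(i)
--     for k in range(len(head_group)):
--         i = head_group[k]
--         grouping[i] = k
--         for j in range(len(stc)):
--             if stc[i][j] == 1:
--                 grouping[j] = k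
--
--     return grouping
-- ===== SOURCE B (Python) =====
-- def get_parsed_grouping_v2(fields, rel_g, labeling):
--     stc = rel_g[len(fields):]
--     n = len(stc)
--     heads = [i for i in range(n) if 1 in stc[i][:n]]
--     out = []
--     for j in range(n):
--         g = -1
--         for k, i in reversed(list(enumerate(heads))):
--             if stc[i][j] == 1 or i == j:
--                 g = k
--                 break
--         out.append(g)
--     return out
-- ===== Notes on version B (the rewrite author's own statement) =====
-- stated objective: alternative
-- what changed: Replaces A's mutable grouping array with last-writer-wins overwrites by a pure per-position computation: collect the head rows once, then for each output position search the heads backwards for the last head that covers it (its own row or a 1 in that column) and emit that head's index.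
import Mathlib
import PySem

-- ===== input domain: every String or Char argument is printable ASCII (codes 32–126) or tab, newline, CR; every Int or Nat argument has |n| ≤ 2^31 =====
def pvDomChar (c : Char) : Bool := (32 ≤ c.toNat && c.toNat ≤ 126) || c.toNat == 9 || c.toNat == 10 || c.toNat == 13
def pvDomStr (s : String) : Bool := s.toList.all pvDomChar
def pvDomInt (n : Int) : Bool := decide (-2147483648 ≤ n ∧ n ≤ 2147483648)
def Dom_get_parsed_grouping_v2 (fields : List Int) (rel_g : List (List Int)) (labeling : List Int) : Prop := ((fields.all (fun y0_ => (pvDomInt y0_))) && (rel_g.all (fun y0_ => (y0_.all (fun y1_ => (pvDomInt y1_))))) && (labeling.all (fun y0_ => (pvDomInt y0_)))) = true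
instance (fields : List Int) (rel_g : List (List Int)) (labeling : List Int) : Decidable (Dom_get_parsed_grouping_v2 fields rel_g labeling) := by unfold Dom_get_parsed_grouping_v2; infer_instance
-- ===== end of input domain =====

-- ===== PORT A =====
-- B replaces A's mutate-and-overwrite grouping array by a per-position backward search
-- over the list of head rows (objective: alternative decomposition, no mutable state).
def get_parsed_grouping_v2 (fields : List Int) (rel_g : List (List Int)) (labeling : List Int) : List Int :=
  let stc := rel_g.drop fields.length
  let n := stc.length
  let head_group : List Nat :=
    (List.range n).foldl (fun hg i =>
      (List.range n).foldl (fun hg j =>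
        if ((stc.getD i []).getD j 0 == 1 && !(hg.contains i)) then hg ++ [i] else hg) hg) []
  let grouping := List.replicate n (-1 : Int)
  (List.range head_group.length).foldl (fun g k =>
    let i := head_group.getD k 0
    let g := g.set i (k : Int)
    (List.range n).foldl (fun g j =>
      if ((stc.getD i []).getD j 0 == 1) then g.set j (k : Int) else g) g) grouping

-- ===== PORT B =====
def get_parsed_grouping_v2_alt (fields : List Int) (rel_g : List (List Int)) (labeling : List Int) : List Int :=
  let stc := rel_g.drop fields.length
  let n := stc.length
  let heads := (List.range n).filter (fun i => ((stc.getD i []).take n).contains (1 : Int))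
  (List.range n).map (fun j =>
    match (heads.zipIdx 0).reverse.find?
        (fun p => ((stc.getD p.1 []).getD j 0 == 1 || p.1 == j)) with
    | some p => (p.2 : Int)
    | none => -1)

-- ===== PRECONDITION & SPEC =====
-- Pre_ excludes exactly the inputs where Python A raises IndexError: some row of
-- rel_g[len(fields):] shorter than the number of those rows (stc[i][j] out of range).
def Pre_get_parsed_grouping_v2 (fields : List Int) (rel_g : List (List Int)) (labeling : List Int) : Prop :=
  ∀ row ∈ rel_g.drop fields.length, (rel_g.drop fields.length).length ≤ row.length
instance (fields : List Int) (rel_g : List (List Int)) (labeling : List Int) : Decidable (Pre_get_parsed_grouping_v2 fields rel_g labeling) := by unfold Pre_get_parsed_grouping_v2; infer_instance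
def pvWitness_get_parsed_grouping_v2 : List Int × List (List Int) × List Int := ([], [[1, 0], [0, 0]], [])
def Spec_get_parsed_grouping_v2 (fields : List Int) (rel_g : List (List Int)) (labeling : List Int) (out : List Int) : Prop := out = get_parsed_grouping_v2_alt fields rel_g labeling
instance (fields : List Int) (rel_g : List (List Int)) (labeling : List Int) (out : List Int) : Decidable (Spec_get_parsed_grouping_v2 fields rel_g labeling out) := by unfold Spec_get_parsed_grouping_v2; infer_instance

-- ===== CLAIM (what is proved, stated in full; the proofs are below) =====
def Claim_equal_get_parsed_grouping_v2 : Prop := ∀ (fields : List Int) (rel_g : List (List Int)) (labeling : List Int), Dom_get_parsed_grouping_v2 fields rel_g labeling → Pre_get_parsed_grouping_v2 fields rel_g labeling → Spec_get_parsed_grouping_v2 fields rel_g labeling (get_parsed_grouping_v2 fields rel_g labeling)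

-- ===== LEMMAS AND PROOFS =====

theorem pv_contains_take_succ (row : List Int) (m : Nat) :
    (row.take (m + 1)).contains (1 : Int) =
      ((row.take m).contains (1 : Int) || (row.getD m 0 == 1)) := by
  rw [List.take_add_one]
  cases h : row[m]? with
  | none =>
      simp [List.getD, h]
  | some a =>
      by_cases ha : a = 1
      · simp [List.getD, h, ha]
      · have hb : (a == (1 : Int)) = false := by simp [ha]
        simp [List.getD, h, hb]
        exact fun h1 => absurd h1.symm ha

-- inner head-collection fold: appends i once iff some of the first n entries is 1
theorem pv_inner_head (row : List Int) (i : Nat) :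
    ∀ (n : Nat) (hg : List Nat),
    (List.range n).foldl (fun hg j =>
        if (row.getD j 0 == 1 && !(hg.contains i)) then hg ++ [i] else hg) hg =
      if ((row.take n).contains (1 : Int) && !(hg.contains i)) then hg ++ [i] else hg := by
  intro n
  induction n with
  | zero => intro hg; simp
  | succ m ih =>
      intro hg
      rw [List.range_succ, List.foldl_append, ih hg, pv_contains_take_succ]
      by_cases h2 : i ∈ hg
      · simp [h2]
      · by_cases h1 : (1 : Int) ∈ row.take m
        · simp [h1, h2]
        · simp [h1, h2]

-- outer head-collection fold over a nodup list with fresh start = start ++ filter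
theorem pv_outer_head (c : Nat → Bool) :
    ∀ (L : List Nat) (hg : List Nat), L.Nodup → (∀ x ∈ L, x ∉ hg) →
    L.foldl (fun hg i => if (c i && !(hg.contains i)) then hg ++ [i] else hg) hg =
      hg ++ L.filter c := by
  intro L
  induction L with
  | nil => intro hg _ _; simp
  | cons a L ih =>
      intro hg hnd hfresh
      have ha : hg.contains a = false := by
        simpa using hfresh a (by simp)
      by_cases hc : c a
      · have : ∀ x ∈ L, x ∉ hg ++ [a] := by
          intro x hx
          simp only [List.mem_append, List.mem_singleton]
          rintro (h | rfl)
          · exact hfresh x (by simp [hx]) h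
          · exact (List.nodup_cons.mp hnd).1 hx
        simp only [List.foldl_cons]
        rw [if_pos (by simp [hc]; simpa using ha)]
        rw [ih (hg ++ [a]) (List.nodup_cons.mp hnd).2 this]
        simp [hc]
      · simp only [List.foldl_cons]
        rw [if_neg (by simp [hc])]
        rw [ih hg (List.nodup_cons.mp hnd).2 (fun x hx => hfresh x (by simp [hx]))]
        simp [hc]

-- A's indexed fold over head_group as a fold over zipIdx
theorem pv_idx_fold (f : List Int → Nat → Nat → List Int) :
    ∀ (hg : List Nat) (k0 : Nat) (g : List Int),
    (List.range hg.length).foldl (fun g k => f g (hg.getD k 0) (k0 + k)) g =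
      (hg.zipIdx k0).foldl (fun g p => f g p.1 p.2) g := by
  intro hg
  induction hg with
  | nil => intro k0 g; simp
  | cons a hg ih =>
      intro k0 g
      have : List.range (a :: hg).length = 0 :: (List.range hg.length).map Nat.succ := by
        simp [List.range_succ_eq_map]
      rw [this]
      simp only [List.foldl_cons, List.foldl_map, List.getD_cons_zero, List.getD_cons_succ]
      have harg : (fun (g : List Int) (k : Nat) => f g (hg.getD k 0) (k0 + (k + 1))) =
          (fun (g : List Int) (k : Nat) => f g (hg.getD k 0) ((k0 + 1) + k)) := by
        funext g' k
        have hk : k0 + (k + 1) = (k0 + 1) + k := by omega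
        rw [hk]
      rw [harg, ih (k0 + 1)]
      simp [List.zipIdx_cons]

-- one head's write pass (A's body for head i with group index k)
def pvStep (stc : List (List Int)) (n : Nat) (g : List Int) (i k : Nat) : List Int :=
  (List.range n).foldl (fun g j =>
    if ((stc.getD i []).getD j 0 == 1) then g.set j (k : Int) else g) (g.set i (k : Int))

theorem pv_len_inner (c : Nat → Bool) (v : Int) :
    ∀ (L : List Nat) (g : List Int),
    (L.foldl (fun g j => if c j then g.set j v else g) g).length = g.length := by
  intro L
  induction L with
  | nil => intro g; simp
  | cons a L ih =>
      intro g
      rw [List.foldl_cons, ih]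
      by_cases h : c a <;> simp [h]

theorem pv_inner_get (c : Nat → Bool) (v : Int) :
    ∀ (L : List Nat) (g : List Int) (t : Nat), t < g.length →
    (L.foldl (fun g j => if c j then g.set j v else g) g)[t]? =
      if t ∈ L ∧ c t then some v else g[t]? := by
  intro L
  induction L with
  | nil => intro g t ht; simp
  | cons a L ih =>
      intro g t ht
      have hlen : (if c a then g.set a v else g).length = g.length := by
        by_cases h : c a <;> simp [h]
      rw [List.foldl_cons, ih _ t (by rw [hlen]; exact ht)]
      by_cases hmem : t ∈ L ∧ c t
      · simp [hmem]
      · have hiff : (t ∈ a :: L ∧ c t) ↔ (a = t ∧ c t) := by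
          constructor
          · rintro ⟨hm, hct⟩
            rcases List.mem_cons.mp hm with h | h
            · exact ⟨h.symm, hct⟩
            · exact absurd ⟨h, hct⟩ hmem
          · rintro ⟨rfl, hct⟩; exact ⟨List.mem_cons_self, hct⟩
        rw [if_neg hmem]
        by_cases hat : a = t ∧ c t
        · rcases hat with ⟨rfl, hct⟩
          simp [hct, ht]
        · rw [if_neg (fun h => hat (hiff.mp h))]
          by_cases hca : c a
          · have hne : a ≠ t := fun h => hat ⟨h, by
              rcases Decidable.em (c t) with h' | h'
              · exact h'
              · subst h; exact absurd hca h'⟩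
            simp [hca, hne]
          · simp [hca]

theorem pv_step_len (stc : List (List Int)) (n : Nat) (g : List Int) (i k : Nat) :
    (pvStep stc n g i k).length = g.length := by
  unfold pvStep
  rw [pv_len_inner]
  simp

theorem pv_step_get (stc : List (List Int)) (n : Nat) (g : List Int) (i k t : Nat)
    (hg : g.length = n) (ht : t < n) :
    (pvStep stc n g i k)[t]? =
      if ((stc.getD i []).getD t 0 == 1 || i == t) then some (k : Int) else g[t]? := by
  unfold pvStep
  rw [pv_inner_get _ _ _ _ t (by simp [hg]; exact ht)]
  have hmem : t ∈ List.range n := List.mem_range.mpr ht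
  by_cases h1 : (stc.getD i []).getD t 0 = 1
  · simp only [List.getD_eq_getElem?_getD] at h1
    simp [h1, hmem]
  · simp only [List.getD_eq_getElem?_getD] at h1
    by_cases h2 : i = t
    · subst h2
      simp [List.getElem?_set, hg, ht]
    · simp [h1, h2]

theorem pv_outer_len (stc : List (List Int)) (n : Nat) :
    ∀ (L : List (Nat × Nat)) (g : List Int),
    (L.foldl (fun g p => pvStep stc n g p.1 p.2) g).length = g.length := by
  intro L
  induction L with
  | nil => intro g; simp
  | cons p L ih => intro g; rw [List.foldl_cons, ih, pv_step_len]

-- the heart of the proof: last-writer-wins over the heads fold = first match in reverse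
theorem pv_outer_get (stc : List (List Int)) (n : Nat) :
    ∀ (L : List (Nat × Nat)) (g : List Int), g.length = n → ∀ t, t < n →
    (L.foldl (fun g p => pvStep stc n g p.1 p.2) g)[t]? =
      (match L.reverse.find?
          (fun p => ((stc.getD p.1 []).getD t 0 == 1 || p.1 == t)) with
       | some p => some ((p.2 : Nat) : Int)
       | none => g[t]?) := by
  intro L
  induction L with
  | nil => intro g hg t ht; simp
  | cons p L ih =>
      intro g hg t ht
      rw [List.foldl_cons, ih (pvStep stc n g p.1 p.2) (by rw [pv_step_len]; exact hg) t ht]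
      rw [List.reverse_cons, List.find?_append]
      cases hf : L.reverse.find? (fun p => ((stc.getD p.1 []).getD t 0 == 1 || p.1 == t)) with
      | some q => simp
      | none =>
          simp only [Option.none_or]
          rw [pv_step_get stc n g p.1 p.2 t hg ht]
          cases hcb : ((stc.getD p.1 []).getD t 0 == 1 || p.1 == t) with
          | true =>
              simp only [List.getD_eq_getElem?_getD] at hcb
              simp [List.find?_cons, hcb]
          | false =>
              simp only [List.getD_eq_getElem?_getD] at hcb
              simp [List.find?_cons, hcb]


theorem pv_main (stc : List (List Int)) :
    (let n := stc.length
     let head_group : List Nat :=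
       (List.range n).foldl (fun hg i =>
         (List.range n).foldl (fun hg j =>
           if ((stc.getD i []).getD j 0 == 1 && !(hg.contains i)) then hg ++ [i] else hg) hg) []
     let grouping := List.replicate n (-1 : Int)
     (List.range head_group.length).foldl (fun g k =>
       let i := head_group.getD k 0
       let g := g.set i (k : Int)
       (List.range n).foldl (fun g j =>
         if ((stc.getD i []).getD j 0 == 1) then g.set j (k : Int) else g) g) grouping) =
    (let n := stc.length
     let heads := (List.range n).filter (fun i => ((stc.getD i []).take n).contains (1 : Int))
     (List.range n).map (fun j =>
       match (heads.zipIdx 0).reverse.find?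
           (fun p => ((stc.getD p.1 []).getD j 0 == 1 || p.1 == j)) with
       | some p => (p.2 : Int)
       | none => -1)) := by
  simp only []
  set n := stc.length with hn
  set c : Nat → Bool := fun i => ((stc.getD i []).take n).contains (1 : Int) with hc
  -- head_group = (range n).filter c
  have hhead :
      (List.range n).foldl (fun hg i =>
        (List.range n).foldl (fun hg j =>
          if ((stc.getD i []).getD j 0 == 1 && !(hg.contains i)) then hg ++ [i] else hg) hg) [] =
      (List.range n).filter c := by
    have hfun : (fun (hg : List Nat) (i : Nat) =>
        (List.range n).foldl (fun hg j =>
          if ((stc.getD i []).getD j 0 == 1 && !(hg.contains i)) then hg ++ [i] else hg) hg) =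
        (fun hg i => if (c i && !(hg.contains i)) then hg ++ [i] else hg) := by
      funext hg i
      exact pv_inner_head (stc.getD i []) i n hg
    rw [hfun]
    simpa using pv_outer_head c (List.range n) [] (List.nodup_range) (by simp)
  rw [hhead]
  set heads := (List.range n).filter c with hheads
  -- A's indexed fold over heads = fold over heads.zipIdx 0 of pvStep
  have hA :
      (List.range heads.length).foldl (fun g k =>
        let i := heads.getD k 0
        let g := g.set i (k : Int)
        (List.range n).foldl (fun g j =>
          if ((stc.getD i []).getD j 0 == 1) then g.set j (k : Int) else g) g)
        (List.replicate n (-1 : Int)) =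
      (heads.zipIdx 0).foldl (fun g p => pvStep stc n g p.1 p.2)
        (List.replicate n (-1 : Int)) := by
    have := pv_idx_fold (fun g i k => pvStep stc n g i k) heads 0 (List.replicate n (-1 : Int))
    simpa [pvStep] using this
  rw [hA]
  -- elementwise comparison
  apply List.ext_getElem?
  intro t
  by_cases ht : t < n
  · rw [pv_outer_get stc n (heads.zipIdx 0) (List.replicate n (-1 : Int)) (by simp) t ht]
    simp only [List.getElem?_map, List.getElem?_range ht, Option.map_some]
    cases hf : (heads.zipIdx 0).reverse.find?
        (fun p => ((stc.getD p.1 []).getD t 0 == 1 || p.1 == t)) with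
    | some q => rfl
    | none => simp [ht]
  · have hlenA : ((heads.zipIdx 0).foldl (fun g p => pvStep stc n g p.1 p.2)
        (List.replicate n (-1 : Int))).length = n := by
      rw [pv_outer_len]; simp
    rw [List.getElem?_eq_none (by rw [hlenA]; omega),
        List.getElem?_eq_none (by simp; omega)]

-- ===== VERDICT (by name: the statement is the Claim_ definition above) =====
theorem get_parsed_grouping_v2_spec : Claim_equal_get_parsed_grouping_v2 := by
  intro fields rel_g labeling _ _
  unfold Spec_get_parsed_grouping_v2 get_parsed_grouping_v2 get_parsed_grouping_v2_alt
  exact pv_main (rel_g.drop fields.length)
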